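-- pv_equiv track=rewrite | github.com/sashu2310/cartograph | cartograph/v2/cli/_shared.py | resolve_qname
-- ===== SOURCE A (Python) =====
-- def resolve_qname(functions: dict, name: str) -> str | None:
--     """Map a user-supplied name to a full qname: exact → suffix → substring.
--
--     Matches v1's `_find_function` behaviour. First suffix hit and first
--     substring hit win — no scoring, no ranking. Callers get `None` if
--     nothing matches; `qname_suggestions()` supplies hints for the error.
--     """
--     if name in functions:
--         return name
--     for qn in functions:
--         if qn.endswith(f".{name}"):
--             return qn
--     needle = name.lower()
--     for qn in functions:
--         if needle in qn.lower():
--             return qn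
--     return None
-- ===== SOURCE B (Python) =====
-- def resolve_qname(functions: dict, name: str):
--     """Single pass: suffix hit returns immediately; first substring hit is
--     remembered and returned only if no suffix match exists anywhere."""
--     if name in functions:
--         return name
--     suffix = f".{name}"
--     needle = name.lower()
--     first_substr = None
--     for qn in functions:
--         if qn.endswith(suffix):
--             return qn
--         if first_substr is None and needle in qn.lower():
--             first_substr = qn
--     return first_substr
-- ===== Notes on version B (the rewrite author's own statement) =====
-- stated objective: alternative
-- what changed: Replaces A's two sequential scans (suffix scan, then substring scan) by one fused pass that returns on the first suffix hit and carries the first substring candidate in an accumulator returned only after the whole dict is scanned; the suffix string and lowercased needle are computed once instead of per iteration.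
import Mathlib
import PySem

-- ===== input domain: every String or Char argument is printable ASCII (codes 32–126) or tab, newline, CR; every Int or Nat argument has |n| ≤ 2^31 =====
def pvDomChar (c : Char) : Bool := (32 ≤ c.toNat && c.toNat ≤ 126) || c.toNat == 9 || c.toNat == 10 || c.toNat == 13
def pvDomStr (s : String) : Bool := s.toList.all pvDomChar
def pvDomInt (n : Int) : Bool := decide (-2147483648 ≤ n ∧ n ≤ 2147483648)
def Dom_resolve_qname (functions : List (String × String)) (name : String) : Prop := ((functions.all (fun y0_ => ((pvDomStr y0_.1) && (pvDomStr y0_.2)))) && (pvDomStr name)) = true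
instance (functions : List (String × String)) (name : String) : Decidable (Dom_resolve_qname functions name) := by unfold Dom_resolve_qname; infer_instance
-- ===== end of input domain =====

-- B fuses A's two scans into one pass with a first-substring accumulator (alternative decomposition, same cost).
-- ===== PORT A =====
def aSufLoop (l : List (String × String)) (name : String) : Option String :=
  match l with
  | [] => none
  | (qn, _) :: t => if PySem.Str.endswith qn ("." ++ name) then some qn else aSufLoop t name

def aSubLoop (l : List (String × String)) (needle : String) : Option String :=
  match l with
  | [] => none
  | (qn, _) :: t => if PySem.Str.isIn needle (PySem.Str.lower qn) then some qn else aSubLoop t needle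

def resolve_qname (functions : List (String × String)) (name : String) : Option String :=
  if functions.any (fun p => p.1 == name) then some name
  else
    match aSufLoop functions name with
    | some qn => some qn
    | none => aSubLoop functions (PySem.Str.lower name)

-- ===== PORT B =====
def bLoop (l : List (String × String)) (suffix needle : String) (firstSubstr : Option String) :
    Option String :=
  match l with
  | [] => firstSubstr
  | (qn, _) :: t =>
    if PySem.Str.endswith qn suffix then some qn
    else
      bLoop t suffix needle
        (if firstSubstr.isNone && PySem.Str.isIn needle (PySem.Str.lower qn) then some qn
         else firstSubstr)

def resolve_qname_alt (functions : List (String × String)) (name : String) : Option String :=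
  if functions.any (fun p => p.1 == name) then some name
  else bLoop functions ("." ++ name) (PySem.Str.lower name) none

-- ===== PRECONDITION & SPEC =====
def Spec_resolve_qname (functions : List (String × String)) (name : String) (out : Option String) : Prop := out = resolve_qname_alt functions name
instance (functions : List (String × String)) (name : String) (out : Option String) : Decidable (Spec_resolve_qname functions name out) := by unfold Spec_resolve_qname; infer_instance

-- ===== CLAIM (what is proved, stated in full; the proofs are below) =====
def Claim_equal_resolve_qname : Prop := ∀ (functions : List (String × String)) (name : String), Dom_resolve_qname functions name → Spec_resolve_qname functions name (resolve_qname functions name)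

-- ===== LEMMAS AND PROOFS =====
theorem bLoop_eq (l : List (String × String)) (name : String) (acc : Option String) :
    bLoop l ("." ++ name) (PySem.Str.lower name) acc =
      match aSufLoop l name with
      | some qn => some qn
      | none =>
        match acc with
        | some a => some a
        | none => aSubLoop l (PySem.Str.lower name) := by
  induction l generalizing acc with
  | nil => cases acc <;> simp [bLoop, aSufLoop, aSubLoop]
  | cons hd t ih =>
    obtain ⟨qn, v⟩ := hd
    by_cases hs : PySem.Chars.endswith qn.toList ('.' :: name.toList) = true
    · simp [bLoop, aSufLoop, hs]
    · simp [bLoop, aSufLoop, hs, ih]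
      cases h : aSufLoop t name <;> cases acc <;>
        by_cases hi : PySem.Chars.isIn (PySem.Chars.lower name.toList) (PySem.Chars.lower qn.toList) = true <;>
        simp [hi, aSubLoop]

-- ===== VERDICT (by name: the statement is the Claim_ definition above) =====
theorem resolve_qname_spec : Claim_equal_resolve_qname := by
  intro functions name _
  unfold Spec_resolve_qname resolve_qname resolve_qname_alt
  by_cases h : functions.any (fun p => p.1 == name)
  · simp [h]
  · simp only [h, bLoop_eq]
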